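-- pv_equiv track=rewrite | github.com/starreeze/drin-dataset | spider.py | assign_resolution
-- ===== SOURCE A (Python) =====
-- vector_image_extension_names = ["svg"]
--
-- def assign_resolution(url: str, res: str) -> str:
--     if res == "":
--         return url
--     # find the 5th '/' in url and add '/thumb' before it
--     i, count = 0, 0
--     while True:
--         if url[i] == "/":
--             count += 1
--             if count == 5:
--                 break
--         i += 1
--     url = url[:i] + "/thumb" + url[i:]
--     # add suffix
--     url += f"/{res}-" + url[url.rfind("/") + 1 :]
--     extension = url[url.rfind(".") + 1 :]
--     if extension in vector_image_extension_names:
--         url += ".png"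
--     return url
-- ===== SOURCE B (Python) =====
-- vector_image_extension_names = ["svg"]
--
-- def assign_resolution(url: str, res: str) -> str:
--     if res == "":
--         return url
--     # split off the first five '/'-separated pieces; parts[5] raises
--     # IndexError when the url has fewer than five slashes
--     parts = url.split("/", 5)
--     url = "/".join(parts[:5]) + "/thumb/" + parts[5]
--     # add suffix
--     url += f"/{res}-" + url[url.rfind("/") + 1 :]
--     extension = url[url.rfind(".") + 1 :]
--     if extension in vector_image_extension_names:
--         url += ".png"
--     return url
-- ===== Notes on version B (the rewrite author's own statement) =====
-- stated objective: idiomatic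
-- what changed: The manual character-by-character while-loop that counts slashes to locate the 5th '/' is replaced by str.split('/', 5) plus '/'.join, rebuilding the prefix from the split pieces instead of scanning indices.
import Mathlib
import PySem

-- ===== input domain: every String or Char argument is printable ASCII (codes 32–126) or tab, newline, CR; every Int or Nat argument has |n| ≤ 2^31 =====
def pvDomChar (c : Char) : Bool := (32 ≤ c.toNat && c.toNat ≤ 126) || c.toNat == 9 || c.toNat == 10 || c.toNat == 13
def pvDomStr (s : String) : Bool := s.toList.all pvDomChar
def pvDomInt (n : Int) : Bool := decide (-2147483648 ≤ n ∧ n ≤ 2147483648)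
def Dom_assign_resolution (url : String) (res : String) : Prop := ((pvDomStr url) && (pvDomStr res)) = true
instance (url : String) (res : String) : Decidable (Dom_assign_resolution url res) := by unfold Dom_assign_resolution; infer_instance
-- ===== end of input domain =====

-- B replaces A's manual character scan for the 5th '/' by str.split('/', 5) plus '/'.join (idiomatic; same cost).

-- ===== PORT A =====
def vector_image_extension_names : List (List Char) := ["svg".toList]

-- A's 'while True' scan: index i, slash counter; none = the scan runs off the end (IndexError)
def findSlash5 : List Char → Nat → Nat → Option Nat
  | [], _, _ => none
  | c :: rest, i, count =>
    if c = '/' then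
      if count + 1 = 5 then some i else findSlash5 rest (i + 1) (count + 1)
    else findSlash5 rest (i + 1) count

def assign_resolution (url : String) (res : String) : String :=
  if res = "" then url
  else
    match findSlash5 url.toList 0 0 with
    | none => ""   -- the Python loop raises IndexError here; excluded by Pre_
    | some i =>
      let cs := url.toList
      let u1 := PySem.List.slice cs none (some (i : Int)) ++ "/thumb".toList
                  ++ PySem.List.slice cs (some (i : Int)) none
      let u2 := u1 ++ '/' :: res.toList ++ '-' ::
                  PySem.List.slice u1 (some (PySem.Chars.rfind u1 ['/'] + 1)) none
      let ext := PySem.List.slice u2 (some (PySem.Chars.rfind u2 ['.'] + 1)) none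
      if vector_image_extension_names.contains ext then String.ofList (u2 ++ ".png".toList)
      else String.ofList u2

-- ===== PORT B =====
def assign_resolution_alt (url : String) (res : String) : String :=
  if res = "" then url
  else
    let parts := PySem.Chars.splitOnMax url.toList ['/'] 5
    match PySem.List.pyGet? parts 5 with
    | none => ""   -- parts[5] raises IndexError; excluded by Pre_
    | some last =>
      let u1 := PySem.Chars.join ['/'] (PySem.List.slice parts none (some 5))
                  ++ "/thumb/".toList ++ last
      let u2 := u1 ++ '/' :: res.toList ++ '-' ::
                  PySem.List.slice u1 (some (PySem.Chars.rfind u1 ['/'] + 1)) none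
      let ext := PySem.List.slice u2 (some (PySem.Chars.rfind u2 ['.'] + 1)) none
      if vector_image_extension_names.contains ext then String.ofList (u2 ++ ".png".toList)
      else String.ofList u2

-- ===== PRECONDITION & SPEC =====
-- Pre_ excludes exactly the inputs where A raises IndexError: res ≠ "" and fewer than five '/' in url.
def Pre_assign_resolution (url : String) (res : String) : Prop :=
  res = "" ∨ 5 ≤ url.toList.count '/'
instance (url : String) (res : String) : Decidable (Pre_assign_resolution url res) := by
  unfold Pre_assign_resolution; infer_instance

def pvWitness_assign_resolution : String × String := ("https://x.y/a/b/c/d.svg", "220px")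

def Spec_assign_resolution (url : String) (res : String) (out : String) : Prop := out = assign_resolution_alt url res
instance (url : String) (res : String) (out : String) : Decidable (Spec_assign_resolution url res out) := by unfold Spec_assign_resolution; infer_instance

-- ===== CLAIM (what is proved, stated in full; the proofs are below) =====
def Claim_equal_assign_resolution : Prop := ∀ (url : String) (res : String), Dom_assign_resolution url res → Pre_assign_resolution url res → Spec_assign_resolution url res (assign_resolution url res)

-- ===== LEMMAS AND PROOFS =====

lemma go_nonslash (f m : Nat) (c : Char) (rest cur : List Char) (acc : List (List Char))
    (hm : m ≠ 0) (hc : c ≠ '/') :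
    PySem.Chars.splitOnMax.go ['/'] (f + 1) m (c :: rest) cur acc
      = PySem.Chars.splitOnMax.go ['/'] f m rest (c :: cur) acc := by
  rw [PySem.Chars.splitOnMax.go]
  simp [hm, List.isPrefixOf, Ne.symm hc]

lemma go_slash (f m : Nat) (t cur : List Char) (acc : List (List Char)) (hm : m ≠ 0) :
    PySem.Chars.splitOnMax.go ['/'] (f + 1) m ('/' :: t) cur acc
      = PySem.Chars.splitOnMax.go ['/'] f (m - 1) t [] (cur.reverse :: acc) := by
  rw [PySem.Chars.splitOnMax.go]
  simp [hm, List.isPrefixOf]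

lemma go_zero (fuel : Nat) (l cur : List Char) (acc : List (List Char)) :
    PySem.Chars.splitOnMax.go ['/'] fuel 0 l cur acc = ((cur.reverse ++ l) :: acc).reverse := by
  cases fuel with
  | zero => rw [PySem.Chars.splitOnMax.go]
  | succ f => cases l with
    | nil => rw [PySem.Chars.splitOnMax.go]; simp; omega
    | cons c r => rw [PySem.Chars.splitOnMax.go]; simp

lemma go_main : ∀ (p t : List Char) (k fuel : Nat) (cur : List Char) (acc : List (List Char)),
    p.count '/' = k → p.length + t.length + 1 < fuel →
    ∃ P : List (List Char),
      PySem.Chars.splitOnMax.go ['/'] fuel (k + 1) (p ++ '/' :: t) cur acc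
          = acc.reverse ++ P ++ [t]
        ∧ P.length = k + 1 ∧ PySem.Chars.join ['/'] P = cur.reverse ++ p := by
  intro p
  induction p with
  | nil =>
    intro t k fuel cur acc hk hf
    simp at hk; subst hk
    obtain ⟨f, rfl⟩ : ∃ f, fuel = f + 1 := ⟨fuel - 1, by omega⟩
    rw [List.nil_append, go_slash f 1 t cur acc (by omega),
      show (1 : Nat) - 1 = 0 from rfl, go_zero]
    exact ⟨[cur.reverse], by simp, by simp, by rw [PySem.Chars.join_singleton]; simp⟩
  | cons c p ih =>
    intro t k fuel cur acc hk hf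
    obtain ⟨f, rfl⟩ : ∃ f, fuel = f + 1 := ⟨fuel - 1, by omega⟩
    by_cases hc : c = '/'
    · subst hc
      have hk' : p.count '/' + 1 = k := by simpa using hk
      rw [List.cons_append, go_slash f (k + 1) (p ++ '/' :: t) cur acc (by omega)]
      simp only [Nat.add_sub_cancel]
      obtain ⟨k', rfl⟩ : ∃ k', k = k' + 1 := ⟨p.count '/', by omega⟩
      obtain ⟨P', heq, hlen, hjoin⟩ :=
        ih t k' f [] (cur.reverse :: acc) (by omega) (by simp at hf ⊢; omega)
      refine ⟨cur.reverse :: P', ?_, by simp [hlen], ?_⟩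
      · rw [heq]; simp
      · obtain ⟨q, P'', rfl⟩ : ∃ q P'', P' = q :: P'' := by
          cases P' with
          | nil => simp at hlen
          | cons q P'' => exact ⟨q, P'', rfl⟩
        rw [PySem.Chars.join_cons_cons]
        simp at hjoin
        simp [hjoin]
    · have hk' : p.count '/' = k := by
        rw [List.count_cons] at hk; simp [hc] at hk; exact hk
      rw [List.cons_append, go_nonslash f (k + 1) c (p ++ '/' :: t) cur acc (by omega) hc]
      obtain ⟨P, heq, hlen, hjoin⟩ :=
        ih t k f (c :: cur) acc hk' (by simp at hf ⊢; omega)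
      exact ⟨P, heq, hlen, by simp [hjoin]⟩

lemma splitOnMax_main (p t : List Char) (hk : p.count '/' = 4) :
    ∃ P : List (List Char),
      PySem.Chars.splitOnMax (p ++ '/' :: t) ['/'] 5 = P ++ [t]
        ∧ P.length = 5 ∧ PySem.Chars.join ['/'] P = p := by
  obtain ⟨P, heq, hlen, hjoin⟩ :=
    go_main p t 4 ((p ++ '/' :: t).length + 1) [] [] hk (by simp)
  refine ⟨P, ?_, hlen, by simpa using hjoin⟩
  rw [PySem.Chars.splitOnMax]
  simp only [show ¬ ((5 : Int) < 0) by norm_num, if_false]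
  norm_num
  simpa using heq

lemma find5 : ∀ (p t : List Char) (i cnt : Nat), p.count '/' + cnt = 4 →
    findSlash5 (p ++ '/' :: t) i cnt = some (i + p.length) := by
  intro p
  induction p with
  | nil =>
    intro t i cnt h
    simp at h; subst h
    simp [findSlash5]
  | cons c p ih =>
    intro t i cnt h
    by_cases hc : c = '/'
    · subst hc
      rw [List.count_cons] at h; simp at h
      rw [List.cons_append]
      rw [show findSlash5 ('/' :: (p ++ '/' :: t)) i cnt
            = if cnt + 1 = 5 then some i else findSlash5 (p ++ '/' :: t) (i + 1) (cnt + 1)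
          from by simp [findSlash5]]
      rw [if_neg (by omega), ih t (i + 1) (cnt + 1) (by omega)]
      simp; omega
    · rw [List.count_cons] at h; simp [hc] at h
      rw [List.cons_append]
      rw [show findSlash5 (c :: (p ++ '/' :: t)) i cnt = findSlash5 (p ++ '/' :: t) (i + 1) cnt
          from by simp [findSlash5, hc]]
      rw [ih t (i + 1) cnt h]
      simp; omega

lemma decomp : ∀ (cs : List Char) (k : Nat), k + 1 ≤ cs.count '/' →
    ∃ p t, cs = p ++ '/' :: t ∧ p.count '/' = k := by
  intro cs
  induction cs with
  | nil => intro k h; simp at h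
  | cons c cs ih =>
    intro k h
    by_cases hc : c = '/'
    · subst hc
      cases k with
      | zero => exact ⟨[], cs, rfl, rfl⟩
      | succ k' =>
        rw [List.count_cons] at h; simp at h
        obtain ⟨p, t, rfl, hp⟩ := ih k' (by omega)
        exact ⟨'/' :: p, t, rfl, by simp [hp]⟩
    · rw [List.count_cons] at h; simp [hc] at h
      obtain ⟨p, t, rfl, hp⟩ := ih k h
      exact ⟨c :: p, t, rfl, by simp [hc, hp]⟩

-- ===== VERDICT (by name: the statement is the Claim_ definition above) =====
theorem assign_resolution_spec : Claim_equal_assign_resolution := by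
  intro url res _ hpre
  unfold Spec_assign_resolution
  by_cases hres : res = ""
  · simp [assign_resolution, assign_resolution_alt, hres]
  · have hcount : 5 ≤ url.toList.count '/' := by
      cases hpre with
      | inl h => exact absurd h hres
      | inr h => exact h
    obtain ⟨p, t, hcs, hp⟩ := decomp url.toList 4 hcount
    obtain ⟨P, hsplit, hlen, hjoin⟩ := splitOnMax_main p t hp
    have hfind : findSlash5 url.toList 0 0 = some p.length := by
      rw [hcs]; simpa using find5 p t 0 0 (by omega)
    have hget : PySem.List.pyGet? (PySem.Chars.splitOnMax url.toList ['/'] 5) 5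
        = some t := by
      rw [hcs, hsplit, show ((5 : Int)) = ((P.length : Nat) : Int) by simp [hlen]]
      exact PySem.List.pyGet?_append_length P [] t
    have htake : PySem.List.slice (PySem.Chars.splitOnMax url.toList ['/'] 5) none (some 5)
        = P := by
      rw [hcs, hsplit, show ((5 : Int)) = ((5 : Nat) : Int) by norm_num,
        PySem.List.slice_to_natCast]
      exact List.take_left' hlen
    have hu1 : PySem.List.slice url.toList none (some ((p.length : Nat) : Int))
          ++ "/thumb".toList ++ PySem.List.slice url.toList (some ((p.length : Nat) : Int)) none
        = PySem.Chars.join ['/']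
            (PySem.List.slice (PySem.Chars.splitOnMax url.toList ['/'] 5) none (some 5))
          ++ "/thumb/".toList ++ t := by
      rw [htake, hjoin, PySem.List.slice_to_natCast, PySem.List.slice_from_natCast,
        hcs, List.take_left' rfl, List.drop_left' rfl,
        show "/thumb/".toList = "/thumb".toList ++ ['/'] from by decide]
      simp
    rw [assign_resolution, assign_resolution_alt, if_neg hres, if_neg hres]
    simp only [hfind, hget]
    rw [hu1]
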